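-- pv_equiv track=rewrite | github.com/degenai/Dataset9 | scraper/exploration_probe.py | generate_powers_of_10
-- ===== SOURCE A (Python) =====
-- from typing import Dict, List, Optional, Set
--
-- def generate_powers_of_10(min_val: int, max_val: int) -> List[int]:
--     """Generate powers of 10 in range."""
--     result = []
--     power = 1
--     while power <= max_val:
--         if power >= min_val:
--             result.append(power)
--         power *= 10
--     return result
-- ===== SOURCE B (Python) =====
-- def generate_powers_of_10(min_val: int, max_val: int):
--     """Generate powers of 10 in range."""
--     if max_val < 1:
--         return []
--     e_max = 0
--     m = max_val
--     while m >= 10: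
--         m //= 10
--         e_max += 1
--     return [10 ** e for e in range(e_max + 1) if 10 ** e >= min_val]
-- ===== Notes on version B (the rewrite author's own statement) =====
-- stated objective: alternative
-- what changed: Replaces the running-product while-loop with integer digit counting of max_val to get the exponent bound, then a comprehension over the exponent range computing each power independently.
import Mathlib
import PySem

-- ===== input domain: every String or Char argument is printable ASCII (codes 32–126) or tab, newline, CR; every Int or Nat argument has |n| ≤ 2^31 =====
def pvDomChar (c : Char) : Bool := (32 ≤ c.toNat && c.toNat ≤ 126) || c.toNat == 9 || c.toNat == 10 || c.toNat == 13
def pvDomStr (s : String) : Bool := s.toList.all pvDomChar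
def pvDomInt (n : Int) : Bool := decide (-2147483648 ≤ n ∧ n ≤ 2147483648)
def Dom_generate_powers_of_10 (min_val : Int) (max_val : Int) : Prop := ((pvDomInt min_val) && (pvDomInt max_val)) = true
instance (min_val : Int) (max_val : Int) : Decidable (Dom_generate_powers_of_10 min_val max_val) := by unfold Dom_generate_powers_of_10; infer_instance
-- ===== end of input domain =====

-- B replaces A's running-product while-loop by digit counting plus an independent power per exponent (alternative decomposition, same cost).

-- ===== PORT A =====
-- the while-loop of A: power carries the proof 0 < power (always true in the Python run) for termination
def powLoop (min_val max_val : Int) (power : Int) (hp : 0 < power) (acc : List Int) : List Int :=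
  if _h : power ≤ max_val then
    powLoop min_val max_val (power * 10) (by positivity) (if min_val ≤ power then acc ++ [power] else acc)
  else acc
termination_by (max_val + 1 - power).toNat
decreasing_by omega

def generate_powers_of_10 (min_val : Int) (max_val : Int) : List Int :=
  powLoop min_val max_val 1 (by norm_num) []

-- ===== PORT B =====
-- the digit-count loop of Source B: e_max starts at 0 and increments while m >= 10
def countE (m : Int) : Nat :=
  if _h : 10 ≤ m then countE (PySem.Int.floordiv m 10) + 1 else 0
termination_by m.toNat
decreasing_by simp only [PySem.Int.floordiv_eq_ediv_of_pos (by norm_num : (0:Int) < 10)]; omega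

def generate_powers_of_10_alt (min_val : Int) (max_val : Int) : List Int :=
  if max_val < 1 then []
  else
    let e_max := countE max_val
    -- the comprehension [10**e for e in range(e_max+1) if 10**e >= min_val]; e ≥ 0 throughout, so e.toNat is exact
    (PySem.List.pyRange 0 ((e_max : Int) + 1) 1).filterMap
      (fun e => if min_val ≤ (10:Int) ^ e.toNat then some ((10:Int) ^ e.toNat) else none)

-- ===== PRECONDITION & SPEC =====
def Spec_generate_powers_of_10 (min_val : Int) (max_val : Int) (out : List Int) : Prop := out = generate_powers_of_10_alt min_val max_val
instance (min_val : Int) (max_val : Int) (out : List Int) : Decidable (Spec_generate_powers_of_10 min_val max_val out) := by unfold Spec_generate_powers_of_10; infer_instance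

-- ===== CLAIM (what is proved, stated in full; the proofs are below) =====
def Claim_equal_generate_powers_of_10 : Prop := ∀ (min_val : Int) (max_val : Int), Dom_generate_powers_of_10 min_val max_val → Spec_generate_powers_of_10 min_val max_val (generate_powers_of_10 min_val max_val)

-- ===== LEMMAS AND PROOFS =====

-- the digit count brackets m between consecutive powers of 10
theorem countE_spec (m : Int) (hm : 1 ≤ m) :
    (10:Int) ^ (countE m) ≤ m ∧ m < (10:Int) ^ (countE m + 1) := by
  induction hn : m.toNat using Nat.strong_induction_on generalizing m with
  | _ n ih =>
    by_cases h : 10 ≤ m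
    · have hfd : PySem.Int.floordiv m 10 = m / 10 :=
        PySem.Int.floordiv_eq_ediv_of_pos (by norm_num)
      have h1 : 1 ≤ m / 10 := by omega
      have hlt : (m / 10).toNat < n := by omega
      have := ih (m / 10).toNat hlt (m / 10) h1 rfl
      rw [countE, dif_pos h, hfd]
      have h2 : 10 * (m / 10) ≤ m := by omega
      have h3 : m < 10 * (m / 10) + 10 := by omega
      constructor
      · calc (10:Int) ^ (countE (m / 10) + 1) = 10 * 10 ^ (countE (m / 10)) := by ring
          _ ≤ 10 * (m / 10) := by nlinarith [this.1]
          _ ≤ m := h2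
      · calc m < 10 * (m / 10) + 10 := h3
          _ ≤ 10 * (10 ^ (countE (m / 10) + 1)) := by nlinarith [this.2]
          _ = 10 ^ (countE (m / 10) + 1 + 1) := by ring
    · rw [countE, dif_neg h]
      constructor
      · simpa using hm
      · simpa using by omega
termination_by m.toNat

-- unrolling A's loop: once max_val < power·10^n the loop performs exactly the filtered powers p·10^i, i < n
theorem powLoop_spec (min_val max_val : Int) :
    ∀ (n : Nat) (p : Int) (hp : 0 < p) (acc : List Int), max_val < p * 10 ^ n →
      powLoop min_val max_val p hp acc =
        acc ++ (List.range n).filterMap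
          (fun i => if p * 10 ^ i ≤ max_val ∧ min_val ≤ p * 10 ^ i then some (p * 10 ^ i) else none) := by
  intro n
  induction n with
  | zero =>
    intro p hp acc hb
    rw [powLoop]
    have : ¬ p ≤ max_val := by simpa using hb
    simp [this]
  | succ n ih =>
    intro p hp acc hb
    rw [powLoop]
    by_cases h : p ≤ max_val
    · rw [dif_pos h]
      have hb' : max_val < (p * 10) * 10 ^ n := by
        have : p * 10 ^ (n + 1) = (p * 10) * 10 ^ n := by ring
        omega
      rw [ih (p * 10) (by positivity) _ hb']
      have hfm : (fun i => if (p * 10) * 10 ^ i ≤ max_val ∧ min_val ≤ (p * 10) * 10 ^ i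
              then some ((p * 10) * 10 ^ i) else none)
          = (fun i => if p * 10 ^ (i+1) ≤ max_val ∧ min_val ≤ p * 10 ^ (i+1)
              then some (p * 10 ^ (i+1)) else none) := by
        funext i
        have : (p * 10) * 10 ^ i = p * 10 ^ (i + 1) := by ring
        rw [this]
      rw [hfm, List.range_succ_eq_map]
      simp only [List.filterMap_cons, List.filterMap_map, pow_zero, mul_one, h, true_and]
      by_cases hmin : min_val ≤ p
      · simp only [if_pos hmin]
        simp [Function.comp_def]
      · simp only [if_neg hmin]
        simp [Function.comp_def]
    · rw [dif_neg h]
      have hall : ∀ i ∈ List.range (n+1),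
          (if p * 10 ^ i ≤ max_val ∧ min_val ≤ p * 10 ^ i then some (p * 10 ^ i) else none)
            = (none : Option Int) := by
        intro i _
        have h1 : (1:Int) ≤ 10 ^ i := one_le_pow₀ (by norm_num)
        have : ¬ p * 10 ^ i ≤ max_val := by nlinarith
        simp [this]
      rw [List.filterMap_eq_nil_iff.mpr hall, List.append_nil]

theorem generate_powers_of_10_spec : Claim_equal_generate_powers_of_10 := by
  unfold Claim_equal_generate_powers_of_10
  intro min_val max_val _dom
  unfold Spec_generate_powers_of_10 generate_powers_of_10 generate_powers_of_10_alt
  by_cases hneg : max_val < 1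
  · rw [if_pos hneg]
    rw [powLoop_spec min_val max_val 0 1 (by norm_num) [] (by simpa using hneg)]
    simp
  · rw [if_neg hneg]
    have hm : 1 ≤ max_val := by omega
    obtain ⟨hlo, hhi⟩ := countE_spec max_val hm
    set E := countE max_val with hE
    rw [powLoop_spec min_val max_val (E + 1) 1 (by norm_num) [] (by simpa using hhi)]
    simp only [one_mul, List.nil_append]
    have hrange : PySem.List.pyRange 0 ((E : Int) + 1) 1
        = (List.range (E + 1)).map (fun k : Nat => (k : Int)) := by
      rw [PySem.List.pyRange_one]
      have h1 : (((E : Int) + 1) - 0).toNat = E + 1 := by omega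
      rw [h1]
      exact List.map_congr_left (fun k _ => by omega)
    rw [hrange, List.filterMap_map]
    apply List.filterMap_congr
    intro i hi
    have hiE : i ≤ E := by simpa [Nat.lt_succ_iff] using hi
    have hle : (10:Int) ^ i ≤ max_val :=
      le_trans (pow_le_pow_right₀ (by norm_num) hiE) hlo
    simp only [Function.comp_apply, Int.toNat_natCast, hle, true_and]
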